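-- pv_equiv track=rewrite | github.com/czxxjtu/ieee_crawler | journal.py | journal_url_to_number
-- ===== SOURCE A (Python) =====
-- def journal_url_to_number(url):
--     digits = '01234567899'
--     num = ''
--     for i in url[::-1]:
--         if i in digits:
--             num = i + num
--         else:
--             return num
-- ===== SOURCE B (Python) =====
-- def journal_url_to_number(url):
--     stripped = url.rstrip('0123456789')
--     if not stripped:
--         return None
--     return url[len(stripped):]
-- ===== Notes on version B (the rewrite author's own statement) =====
-- stated objective: idiomatic
-- what changed: Replaces the reversed-character accumulation loop with str.rstrip of the digit set and a slice from the stripped length.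
-- outside the precondition, e.g. on journal_url_to_number('123'): A returns None, B returns None; on journal_url_to_number(''): A returns None, B returns None
import Mathlib
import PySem

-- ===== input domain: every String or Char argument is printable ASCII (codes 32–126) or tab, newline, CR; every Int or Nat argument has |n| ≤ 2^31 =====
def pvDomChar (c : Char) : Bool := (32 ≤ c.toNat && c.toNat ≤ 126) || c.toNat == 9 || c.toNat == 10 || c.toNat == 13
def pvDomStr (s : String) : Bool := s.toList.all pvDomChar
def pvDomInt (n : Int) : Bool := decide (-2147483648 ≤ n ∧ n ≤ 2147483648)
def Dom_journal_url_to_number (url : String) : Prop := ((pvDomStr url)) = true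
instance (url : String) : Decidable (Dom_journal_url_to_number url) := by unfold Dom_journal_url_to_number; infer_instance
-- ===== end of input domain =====

-- B replaces A's reversed-character accumulation loop with rstrip of the digit set and a slice (idiomatic).

-- ===== PORT A =====
-- A's for-loop over url[::-1] with an early return; falling off the loop is Python's
-- implicit `return None`, modelled as `none` (excluded by Pre_); `.getD ""` only totalizes.
def pvALoop : List Char → List Char → Option (List Char)
  | [], _ => none
  | c :: rest, num =>
      if c ∈ "01234567899".toList then pvALoop rest (c :: num) else some num

def journal_url_to_number (url : String) : String :=
  ((pvALoop url.toList.reverse []).map String.mk).getD ""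

-- ===== PORT B =====
-- Source B: stripped = url.rstrip('0123456789'); if not stripped: None; return url[len(stripped):]
-- rstrip of a char set = drop the matching suffix, i.e. dropWhile on the reversed char list.
def pvStripped (url : String) : List Char :=
  (url.toList.reverse.dropWhile (fun c => c ∈ "0123456789".toList)).reverse

def journal_url_to_number_alt (url : String) : String :=
  if pvStripped url = [] then ""   -- Python returns None here; excluded by Pre_
  else String.mk (url.toList.drop (pvStripped url).length)

-- ===== PRECONDITION & SPEC =====
-- Pre_ excludes empty and all-digit strings, on which A falls off its loop and returns
-- None (no String value); B likewise returns None there.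
def Pre_journal_url_to_number (url : String) : Prop :=
  (url.toList.any (fun c => !(decide (c ∈ "0123456789".toList)))) = true
instance (url : String) : Decidable (Pre_journal_url_to_number url) := by
  unfold Pre_journal_url_to_number; infer_instance

def pvWitness_journal_url_to_number : String := "abc123"

def Spec_journal_url_to_number (url : String) (out : String) : Prop := out = journal_url_to_number_alt url
instance (url : String) (out : String) : Decidable (Spec_journal_url_to_number url out) := by unfold Spec_journal_url_to_number; infer_instance

-- ===== CLAIM (what is proved, stated in full; the proofs are below) =====
def Claim_equal_journal_url_to_number : Prop := ∀ (url : String), Dom_journal_url_to_number url → Pre_journal_url_to_number url → Spec_journal_url_to_number url (journal_url_to_number url)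

-- ===== LEMMAS AND PROOFS =====
-- A's digit string '01234567899' (with its doubled 9) tests the same membership as '0123456789'.
lemma pv_digits_mem (c : Char) :
    (c ∈ "01234567899".toList) ↔ (c ∈ "0123456789".toList) := by
  show c ∈ ['0','1','2','3','4','5','6','7','8','9','9'] ↔ c ∈ ['0','1','2','3','4','5','6','7','8','9']
  simp

-- A's loop returns the reversed maximal digit prefix of its (reversed) input, prepended to acc,
-- provided some non-digit occurs in the list.
lemma pvALoop_eq (l : List Char) :
    ∀ acc, (∃ c ∈ l, c ∉ "0123456789".toList) →
    pvALoop l acc = some ((l.takeWhile (fun c => decide (c ∈ "0123456789".toList))).reverse ++ acc) := by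
  induction l with
  | nil => intro acc h; simp at h
  | cons c rest ih =>
      intro acc h
      by_cases hc : c ∈ "0123456789".toList
      · have hrest : ∃ d ∈ rest, d ∉ "0123456789".toList := by
          rcases h with ⟨d, hd, hnd⟩
          rcases List.mem_cons.mp hd with h1 | h1
          · exact absurd (h1 ▸ hc) hnd
          · exact ⟨d, h1, hnd⟩
        rw [pvALoop, if_pos ((pv_digits_mem c).mpr hc), ih (c :: acc) hrest,
          List.takeWhile_cons_of_pos (by simpa using hc)]
        simp
      · rw [pvALoop, if_neg ((pv_digits_mem c).not.mpr hc),
          List.takeWhile_cons_of_neg (by simpa using hc)]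
        simp

-- Dropping the rstrip-removed suffix length from the front of the reversed list leaves the digit suffix.
lemma pv_rev_drop (p : Char → Bool) (l : List Char) :
    l.reverse.drop (l.dropWhile p).length = (l.takeWhile p).reverse := by
  have h : l = l.takeWhile p ++ l.dropWhile p := (List.takeWhile_append_dropWhile).symm
  calc l.reverse.drop (l.dropWhile p).length
      = (l.takeWhile p ++ l.dropWhile p).reverse.drop (l.dropWhile p).length := by rw [← h]
    _ = ((l.dropWhile p).reverse ++ (l.takeWhile p).reverse).drop (l.dropWhile p).length := by
        rw [List.reverse_append]
    _ = (l.takeWhile p).reverse := List.drop_left' List.length_reverse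

-- ===== VERDICT (by name: the statement is the Claim_ definition above) =====
theorem journal_url_to_number_spec : Claim_equal_journal_url_to_number := by
  intro url _ hpre
  unfold Spec_journal_url_to_number journal_url_to_number journal_url_to_number_alt
  have hrev : ∃ c ∈ url.toList.reverse, c ∉ "0123456789".toList := by
    rcases List.any_eq_true.mp hpre with ⟨c, hc, hnc⟩
    exact ⟨c, List.mem_reverse.mpr hc, by simpa using hnc⟩
  rw [pvALoop_eq url.toList.reverse [] hrev]
  have hdrop : url.toList.reverse.dropWhile (fun c => decide (c ∈ "0123456789".toList)) ≠ [] := by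
    intro hnil
    rcases hrev with ⟨c, hc, hnc⟩
    exact hnc (of_decide_eq_true ((List.dropWhile_eq_nil_iff.mp hnil) c hc))
  have key := pv_rev_drop (fun c => decide (c ∈ "0123456789".toList)) url.toList.reverse
  rw [List.reverse_reverse] at key
  rw [if_neg (by simpa [pvStripped] using hdrop)]
  simp only [pvStripped, List.length_reverse]
  rw [key]
  simp
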